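-- pv_equiv track=rewrite | github.com/tumuum/prog-book | code/remove_n.py | remove_n
-- ===== SOURCE A (Python) =====
-- def remove_n(alist,k,n):
-- 	"""Removes the first n occurrences of k from alist."""
--
-- 	if n <= 0:
-- 		return alist
--
-- 	retval = []
--
-- 	for x in range(0,len(alist)):
-- 		# Here we use range instead of iterating the list itself
-- 		# We need the current index, to get the rest of the list
-- 		# once one occurrence of k is removed.
-- 		if alist[x] == k:
-- 			if n == 1:
-- 				retval.extend(alist[x+1:]) # This is where we need the index
-- 				return retval			 # a return statement terminates the function
-- 			else:
-- 				n = n-1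
-- 		else:
-- 			retval.append(alist[x])
--
-- 	return retval
-- ===== SOURCE B (Python) =====
-- def remove_n(alist, k, n):
--     """Removes the first n occurrences of k from alist."""
--     if n <= 0:
--         return alist
--     result = list(alist)
--     start = 0
--     for _ in range(n):
--         try:
--             idx = result.index(k, start)
--         except ValueError:
--             break
--         del result[idx]
--         start = idx
--     return result
-- ===== Notes on version B (the rewrite author's own statement) =====
-- stated objective: alternative
-- what changed: A builds the output in one skip-and-append pass over indices with an in-loop counter and an early-return slice; B copies the list once and then repeatedly locates the next occurrence with list.index(k, start) and deletes it in place, up to n times, breaking when none is left.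
import Mathlib
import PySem

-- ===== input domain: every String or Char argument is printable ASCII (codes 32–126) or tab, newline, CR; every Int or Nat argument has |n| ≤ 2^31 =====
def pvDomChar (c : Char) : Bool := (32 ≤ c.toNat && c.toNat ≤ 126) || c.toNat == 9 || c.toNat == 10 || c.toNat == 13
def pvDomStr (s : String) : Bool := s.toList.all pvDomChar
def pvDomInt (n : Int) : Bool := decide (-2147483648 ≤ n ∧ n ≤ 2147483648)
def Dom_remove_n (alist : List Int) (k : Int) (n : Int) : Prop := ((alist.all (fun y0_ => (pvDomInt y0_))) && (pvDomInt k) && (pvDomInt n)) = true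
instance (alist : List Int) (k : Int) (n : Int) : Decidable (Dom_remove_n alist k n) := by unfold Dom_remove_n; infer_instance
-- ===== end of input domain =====

-- B replaces A's single skip-and-append pass with repeated locate-and-delete
-- (index from the last deletion point, up to n times); equal return value, no speed claim.
-- Note: both A and B return the argument list itself when n <= 0 (no observable mutation either way).

-- ===== PORT A =====
-- A's for-x-in-range loop with mutable n and retval; the tail of the list stands for the
-- index x (alist[x] = head, the slice alist[x+1:] = tail), so the loop is structural recursion.
def removeNLoopA (k : Int) : List Int → Int → List Int → List Int
  | [], _, retval => retval                       -- x ran past len(alist)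
  | a :: rest, n, retval =>
    if a = k then
      if n = 1 then
        retval ++ rest                            -- retval.extend(alist[x+1:]); return retval
      else
        removeNLoopA k rest (n - 1) retval        -- n = n-1
    else
      removeNLoopA k rest n (retval ++ [a])       -- retval.append(alist[x])

def remove_n (alist : List Int) (k : Int) (n : Int) : List Int :=
  if n ≤ 0 then alist
  else removeNLoopA k alist n []

-- ===== PORT B =====
-- result.index(k, start): first index ≥ start holding k (none = ValueError). Exact for 0 ≤ start.
def idxFromB (l : List Int) (k : Int) (start : Nat) : Option Nat :=
  match l, start with
  | [], _ => none
  | a :: rest, 0 => if a = k then some 0 else (idxFromB rest k 0).map (· + 1)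
  | _ :: rest, s + 1 => (idxFromB rest k s).map (· + 1)

-- the for-_-in-range(n) loop: locate next occurrence, delete it, continue from there.
def removeNLoopB (k : Int) : Nat → List Int → Nat → List Int
  | 0, result, _ => result
  | m + 1, result, start =>
    match idxFromB result k start with
    | none => result                                        -- break on ValueError
    | some idx => removeNLoopB k m (result.eraseIdx idx) idx  -- del result[idx]; start = idx

def remove_n_alt (alist : List Int) (k : Int) (n : Int) : List Int :=
  if n ≤ 0 then alist
  else removeNLoopB k n.toNat alist 0

-- ===== PRECONDITION & SPEC =====
def Spec_remove_n (alist : List Int) (k : Int) (n : Int) (out : List Int) : Prop := out = remove_n_alt alist k n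
instance (alist : List Int) (k : Int) (n : Int) (out : List Int) : Decidable (Spec_remove_n alist k n out) := by unfold Spec_remove_n; infer_instance

-- ===== CLAIM (what is proved, stated in full; the proofs are below) =====
def Claim_equal_remove_n : Prop := ∀ (alist : List Int) (k : Int) (n : Int), Dom_remove_n alist k n → Spec_remove_n alist k n (remove_n alist k n)

-- ===== LEMMAS AND PROOFS =====

-- canonical meaning: remove the first m occurrences of k
def removeCore (k : Int) : List Int → Nat → List Int
  | l, 0 => l
  | [], _ => []
  | a :: rest, m + 1 => if a = k then removeCore k rest m else a :: removeCore k rest (m + 1)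

theorem removeCore_zero (k : Int) (l : List Int) : removeCore k l 0 = l := by
  cases l <;> rfl

theorem removeCore_not_mem (k : Int) (l : List Int) (m : Nat) (h : k ∉ l) :
    removeCore k l m = l := by
  induction l generalizing m with
  | nil => cases m <;> rfl
  | cons a rest ih =>
    cases m with
    | zero => rfl
    | succ m =>
      simp only [List.mem_cons, not_or] at h
      simp [removeCore, Ne.symm h.1, ih _ h.2]

theorem removeCore_split (k : Int) (p s : List Int) (m : Nat) (hp : k ∉ p) :
    removeCore k (p ++ k :: s) (m + 1) = p ++ removeCore k s m := by
  induction p with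
  | nil => simp [removeCore]
  | cons a p ih =>
    simp only [List.mem_cons, not_or] at hp
    simp [removeCore, Ne.symm hp.1, ih hp.2]

theorem idxFromB_zero_not_mem (k : Int) (l : List Int) (h : k ∉ l) :
    idxFromB l k 0 = none := by
  induction l with
  | nil => rfl
  | cons a rest ih =>
    simp only [List.mem_cons, not_or] at h
    simp [idxFromB, Ne.symm h.1, ih h.2]

theorem idxFromB_zero_split (k : Int) (p s : List Int) (hp : k ∉ p) :
    idxFromB (p ++ k :: s) k 0 = some p.length := by
  induction p with
  | nil => simp [idxFromB]
  | cons a p ih =>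
    simp only [List.mem_cons, not_or] at hp
    simp [idxFromB, Ne.symm hp.1, ih hp.2]

theorem idxFromB_append (k : Int) (suf : List Int) :
    ∀ pre : List Int, idxFromB (pre ++ suf) k pre.length = (idxFromB suf k 0).map (· + pre.length) := by
  intro pre
  induction pre with
  | nil => simp [Option.map_id']
  | cons a pre ih =>
    simp only [List.cons_append, List.length_cons, idxFromB, ih, Option.map_map]
    cases idxFromB suf k 0 with
    | none => rfl
    | some j => simp

theorem eraseIdx_append_left (l₁ l₂ : List Int) (i : Nat) :
    (l₁ ++ l₂).eraseIdx (l₁.length + i) = l₁ ++ l₂.eraseIdx i := by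
  induction l₁ with
  | nil => simp
  | cons a l₁ ih => simp [Nat.succ_add, ih]

theorem exists_first_split (k : Int) (l : List Int) (h : k ∈ l) :
    ∃ p s, l = p ++ k :: s ∧ k ∉ p := by
  induction l with
  | nil => cases h
  | cons a rest ih =>
    by_cases ha : a = k
    · exact ⟨[], rest, by simp [ha], by simp⟩
    · have hk : k ∈ rest := by
        rw [List.mem_cons] at h
        rcases h with h | h
        · exact absurd h.symm ha
        · exact h
      rcases ih hk with ⟨p, s, rfl, hp⟩
      exact ⟨a :: p, s, rfl, by simp [hp, Ne.symm ha]⟩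

theorem loopB_eq (k : Int) (m : Nat) :
    ∀ pre suf : List Int, k ∉ pre →
      removeNLoopB k m (pre ++ suf) pre.length = pre ++ removeCore k suf m := by
  induction m with
  | zero => intro pre suf _; rw [removeNLoopB, removeCore_zero]
  | succ m ih =>
    intro pre suf hpre
    by_cases hk : k ∈ suf
    · rcases exists_first_split k suf hk with ⟨p, s, rfl, hp⟩
      have hidx : idxFromB (pre ++ (p ++ k :: s)) k pre.length = some (p.length + pre.length) := by
        rw [idxFromB_append, idxFromB_zero_split k p s hp]; rfl
      have herase : (pre ++ (p ++ k :: s)).eraseIdx (p.length + pre.length) = (pre ++ p) ++ s := by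
        have := eraseIdx_append_left (pre ++ p) (k :: s) 0
        simpa [Nat.add_comm, List.append_assoc] using this
      have hrec := ih (pre ++ p) s (by simp [hpre, hp])
      simp only [removeNLoopB, hidx, herase]
      have hlen : p.length + pre.length = (pre ++ p).length := by simp [Nat.add_comm]
      rw [hlen, hrec, removeCore_split k p s m hp]
      simp
    · have : idxFromB (pre ++ suf) k pre.length = none := by
        rw [idxFromB_append, idxFromB_zero_not_mem k suf hk]; rfl
      simp only [removeNLoopB, this]
      rw [removeCore_not_mem k suf (m + 1) hk]

theorem loopA_eq (k : Int) (l : List Int) :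
    ∀ n retval, 1 ≤ n →
      removeNLoopA k l n retval = retval ++ removeCore k l n.toNat := by
  induction l with
  | nil =>
    intro n retval _
    have : removeCore k [] n.toNat = [] := by cases h : n.toNat <;> rfl
    simp [removeNLoopA, this]
  | cons a rest ih =>
    intro n retval hn
    have hm : ∃ m, n.toNat = m + 1 := ⟨n.toNat - 1, by omega⟩
    rcases hm with ⟨m, hm⟩
    by_cases ha : a = k
    · by_cases h1 : n = 1
      · subst h1
        simp [removeNLoopA, ha, removeCore, hm, removeCore_zero,
              show m = 0 by omega]
      · have : (n - 1).toNat = m := by omega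
        simp [removeNLoopA, ha, h1, ih (n - 1) retval (by omega), hm, removeCore, this]
    · simp [removeNLoopA, ha, ih n (retval ++ [a]) hn, hm, removeCore]

-- ===== VERDICT (by name: the statement is the Claim_ definition above) =====
theorem remove_n_spec : Claim_equal_remove_n := by
  intro alist k n _
  unfold Spec_remove_n remove_n remove_n_alt
  by_cases hn : n ≤ 0
  · simp [hn]
  · rw [if_neg hn, if_neg hn]
    rw [loopA_eq k alist n [] (by omega)]
    have := loopB_eq k n.toNat [] alist (by simp)
    simpa using this.symm
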